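-- pv_equiv track=rewrite | github.com/estraviz/codewars | 7_kyu/Bouncy Numbers/python/solution.py | is_bouncy
-- ===== SOURCE A (Python) =====
-- def is_bouncy(number):
--     if number < 100:
--         return False
--     increase, decrease = False, False
--     prev = None
--     for i, digit in enumerate(str(number)):
--         if i != 0:
--             if increase and decrease:
--                 return True
--             else:
--                 if int(digit) > prev:
--                     increase = True
--                 elif int(digit) < prev:
--                     decrease = True
--         prev = int(digit)
--
--     if increase and decrease:
--         return True
--     else:
--         return False
-- ===== SOURCE B (Python) =====
-- def is_bouncy(number):
--     if number < 100:
--         return False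
--     s = list(str(number))
--     return s != sorted(s) and s != sorted(s, reverse=True)
-- ===== Notes on version B (the rewrite author's own statement) =====
-- stated objective: simpler
-- what changed: Replaces the pairwise flag-tracking scan with early return by two sort-and-compare checks: bouncy iff the digit string equals neither its ascending nor its descending sort.
import Mathlib
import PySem

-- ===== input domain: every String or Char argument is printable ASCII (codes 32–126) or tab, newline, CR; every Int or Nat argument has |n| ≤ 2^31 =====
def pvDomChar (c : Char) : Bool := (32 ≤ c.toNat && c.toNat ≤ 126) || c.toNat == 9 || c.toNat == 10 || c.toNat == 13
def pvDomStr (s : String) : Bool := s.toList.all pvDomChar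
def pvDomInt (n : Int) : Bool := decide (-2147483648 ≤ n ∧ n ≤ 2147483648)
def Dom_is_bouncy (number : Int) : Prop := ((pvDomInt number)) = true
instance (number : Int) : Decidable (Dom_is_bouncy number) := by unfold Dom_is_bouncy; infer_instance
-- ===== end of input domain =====

-- B replaces A's flag-tracking digit scan by comparing the digit string with its two sorted forms (objective: simpler).

-- ===== PORT A =====
-- int(digit) for the single digit char produced by str(number) is its code minus 48
-- (exact: for number ≥ 100 str(number) consists of '0'..'9' only).
def is_bouncy_loop : List (Int × Char) → Bool → Bool → Int → Bool
  | [], increase, decrease, _ => increase && decrease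
  | (i, digit) :: rest, increase, decrease, prev =>
    if i ≠ 0 then
      if increase && decrease then true
      else
        let dv : Int := (digit.toNat : Int) - 48
        if dv > prev then is_bouncy_loop rest true decrease dv
        else if dv < prev then is_bouncy_loop rest increase true dv
        else is_bouncy_loop rest increase decrease dv
    else is_bouncy_loop rest increase decrease ((digit.toNat : Int) - 48)

def is_bouncy (number : Int) : Bool :=
  if number < 100 then false
  else is_bouncy_loop (PySem.List.enumerate (PySem.Int.toChars number) 0) false false 0

-- ===== PORT B =====
def is_bouncy_alt (number : Int) : Bool :=
  if number < 100 then false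
  else
    let s := PySem.Int.toChars number
    decide (s ≠ PySem.List.sorted s (fun x => x) false) &&
    decide (s ≠ PySem.List.sorted s (fun x => x) true)

-- ===== PRECONDITION & SPEC =====
def Spec_is_bouncy (number : Int) (out : Bool) : Prop := out = is_bouncy_alt number
instance (number : Int) (out : Bool) : Decidable (Spec_is_bouncy number out) := by unfold Spec_is_bouncy; infer_instance

-- ===== CLAIM =====
def Claim_equal_is_bouncy : Prop := ∀ (number : Int), Dom_is_bouncy number → Spec_is_bouncy number (is_bouncy number)

-- ===== LEMMAS AND PROOFS =====

-- adjacent strict rise / strict fall among the digit values, threaded through the previous digit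
def hasUp : Int → List Char → Bool
  | _, [] => false
  | p, c :: t => (p < (c.toNat : Int) - 48) || hasUp ((c.toNat : Int) - 48) t

def hasDown : Int → List Char → Bool
  | _, [] => false
  | p, c :: t => ((c.toNat : Int) - 48 < p) || hasDown ((c.toNat : Int) - 48) t

lemma loop_eq_flags : ∀ (l : List Char) (inc dec : Bool) (prev : Int) (k : Nat),
    is_bouncy_loop (PySem.List.enumerate l ((k : Int) + 1)) inc dec prev =
      ((inc || hasUp prev l) && (dec || hasDown prev l)) := by
  intro l
  induction l with
  | nil => intro inc dec prev k; simp [PySem.List.enumerate_nil, is_bouncy_loop, hasUp, hasDown]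
  | cons c t ih =>
    intro inc dec prev k
    rw [PySem.List.enumerate_cons]
    have hk : ((k : Int) + 1) ≠ 0 := by omega
    by_cases hid : inc && dec
    · have hi : inc = true := by exact (Bool.and_eq_true_iff.mp hid).1
      have hd : dec = true := by exact (Bool.and_eq_true_iff.mp hid).2
      simp [is_bouncy_loop, hk, hi, hd]
    · simp only [is_bouncy_loop, if_pos hk, if_neg hid]
      have hkk : ((k : Int) + 1 + 1) = ((k + 1 : Nat) : Int) + 1 := by push_cast; ring
      by_cases h1 : ((c.toNat : Int) - 48) > prev
      · rw [if_pos h1, hkk, ih]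
        have hd' : ¬(((c.toNat : Int) - 48) < prev) := by omega
        cases inc <;> cases dec <;>
          first
            | exact absurd rfl hid
            | simp [hasUp, hasDown, h1, hd']
      · rw [if_neg h1]
        by_cases h2 : ((c.toNat : Int) - 48) < prev
        · rw [if_pos h2, hkk, ih]
          have hu' : ¬(prev < ((c.toNat : Int) - 48)) := by omega
          cases inc <;> cases dec <;>
            first
              | exact absurd rfl hid
              | simp [hasUp, hasDown, h2, hu']
        · rw [if_neg h2, hkk, ih]
          have hu' : ¬(prev < ((c.toNat : Int) - 48)) := by omega
          have hd' : ¬(((c.toNat : Int) - 48) < prev) := by omega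
          cases inc <;> cases dec <;>
            first
              | exact absurd rfl hid
              | simp [hasUp, hasDown, hu', hd']

lemma char_lt_iff (c d : Char) : (c < d) ↔ ((c.toNat : Int) - 48 < (d.toNat : Int) - 48) := by
  constructor
  · intro h
    have : c.toNat < d.toNat := UInt32.lt_iff_toNat_lt.mp (Char.lt_def.mp h)
    omega
  · intro h
    have : c.toNat < d.toNat := by omega
    exact Char.lt_def.mpr (UInt32.lt_iff_toNat_lt.mpr this)

lemma hasDown_iff_not_chain : ∀ (t : List Char) (c : Char),
    (hasDown ((c.toNat : Int) - 48) t = true ↔ ¬ List.IsChain (· ≤ ·) (c :: t)) := by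
  intro t
  induction t with
  | nil => intro c; simp [hasDown]
  | cons d u ih =>
    intro c
    rw [List.isChain_cons_cons]
    simp only [hasDown, Bool.or_eq_true, decide_eq_true_eq, ih d, ← char_lt_iff]
    constructor
    · rintro (h | h)
      · exact fun hc => absurd hc.1 (not_le.mpr h)
      · exact fun hc => h hc.2
    · intro h
      by_cases hle : c ≤ d
      · exact Or.inr (fun hc => h ⟨hle, hc⟩)
      · exact Or.inl (not_le.mp hle)

lemma hasUp_iff_not_chain : ∀ (t : List Char) (c : Char),
    (hasUp ((c.toNat : Int) - 48) t = true ↔ ¬ List.IsChain (fun a b => b ≤ a) (c :: t)) := by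
  intro t
  induction t with
  | nil => intro c; simp [hasUp]
  | cons d u ih =>
    intro c
    rw [List.isChain_cons_cons]
    simp only [hasUp, Bool.or_eq_true, decide_eq_true_eq, ih d, ← char_lt_iff]
    constructor
    · rintro (h | h)
      · exact fun hc => absurd hc.1 (not_le.mpr h)
      · exact fun hc => h hc.2
    · intro h
      by_cases hle : d ≤ c
      · exact Or.inr (fun hc => h ⟨hle, hc⟩)
      · exact Or.inl (not_le.mp hle)

lemma sorted_asc_eq_iff (l : List Char) :
    ((PySem.List.sorted l (fun x => x) false = l) ↔ List.IsChain (· ≤ ·) l) := by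
  constructor
  · intro h
    have := PySem.List.sorted_pairwise (xs := l) (key := fun (x : Char) => x)
    rw [h] at this
    exact List.Pairwise.isChain this
  · intro h
    haveI : IsTrans Char (· ≤ ·) := ⟨fun a b c h1 h2 => le_trans h1 h2⟩
    exact PySem.List.sorted_eq_self_of_pairwise (xs := l) (key := fun x => x)
      (List.isChain_iff_pairwise.mp h)

lemma sorted_desc_eq_iff (l : List Char) :
    ((PySem.List.sorted l (fun x => x) true = l) ↔ List.IsChain (fun a b => b ≤ a) l) := by
  constructor
  · intro h
    have := PySem.List.sorted_pairwise_rev (xs := l) (key := fun (x : Char) => x)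
    rw [h] at this
    exact List.Pairwise.isChain this
  · intro h
    haveI : IsTrans Char (fun a b : Char => b ≤ a) := ⟨fun a b c h1 h2 => le_trans h2 h1⟩
    exact PySem.List.sorted_rev_eq_self_of_pairwise (xs := l) (key := fun x => x)
      (List.isChain_iff_pairwise.mp h)

-- ===== VERDICT =====
set_option maxRecDepth 10000 in
theorem is_bouncy_spec : Claim_equal_is_bouncy := by
  intro number _
  unfold Spec_is_bouncy is_bouncy is_bouncy_alt
  by_cases hlt : number < 100
  · rw [if_pos hlt, if_pos hlt]
  · rw [if_neg hlt, if_neg hlt]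
    cases hl : PySem.Int.toChars number with
    | nil => simp [PySem.List.enumerate_nil, is_bouncy_loop, PySem.List.sorted_eq_nil_iff]
    | cons c t =>
      rw [PySem.List.enumerate_cons]
      show is_bouncy_loop (PySem.List.enumerate t (0 + 1)) false false _ = _
      have h0 : (0 : Int) + 1 = ((0 : Nat) : Int) + 1 := by norm_num
      rw [show is_bouncy_loop (PySem.List.enumerate t (0 + 1)) false false ((c.toNat : Int) - 48)
            = is_bouncy_loop (PySem.List.enumerate t (((0 : Nat) : Int) + 1)) false false ((c.toNat : Int) - 48) by rw [h0],
          loop_eq_flags]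
      simp only [Bool.false_or]
      have E1 : decide (¬ ((c :: t) = PySem.List.sorted (c :: t) (fun x => x) false)) =
          hasDown ((c.toNat : Int) - 48) t := by
        by_cases hb : List.IsChain (fun a b : Char => a ≤ b) (c :: t)
        · have h1 : (c :: t) = PySem.List.sorted (c :: t) (fun x => x) false :=
            ((sorted_asc_eq_iff (c :: t)).mpr hb).symm
          have h2 : hasDown ((c.toNat : Int) - 48) t = false := by
            cases hcase : hasDown ((c.toNat : Int) - 48) t with
            | true => exact absurd hb ((hasDown_iff_not_chain t c).mp hcase)
            | false => rfl
          simp [← h1, h2]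
        · have h2 : hasDown ((c.toNat : Int) - 48) t = true :=
            (hasDown_iff_not_chain t c).mpr hb
          have h1 : ¬ ((c :: t) = PySem.List.sorted (c :: t) (fun x => x) false) :=
            fun h => hb ((sorted_asc_eq_iff (c :: t)).mp h.symm)
          simp [h1, h2]
      have E2 : decide (¬ ((c :: t) = PySem.List.sorted (c :: t) (fun x => x) true)) =
          hasUp ((c.toNat : Int) - 48) t := by
        by_cases hb : List.IsChain (fun a b : Char => b ≤ a) (c :: t)
        · have h1 : (c :: t) = PySem.List.sorted (c :: t) (fun x => x) true :=
            ((sorted_desc_eq_iff (c :: t)).mpr hb).symm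
          have h2 : hasUp ((c.toNat : Int) - 48) t = false := by
            cases hcase : hasUp ((c.toNat : Int) - 48) t with
            | true => exact absurd hb ((hasUp_iff_not_chain t c).mp hcase)
            | false => rfl
          simp [← h1, h2]
        · have h2 : hasUp ((c.toNat : Int) - 48) t = true :=
            (hasUp_iff_not_chain t c).mpr hb
          have h1 : ¬ ((c :: t) = PySem.List.sorted (c :: t) (fun x => x) true) :=
            fun h => hb ((sorted_desc_eq_iff (c :: t)).mp h.symm)
          simp [h1, h2]
      simp only [ne_eq]
      rw [E1, E2, Bool.and_comm]
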